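-- pv_equiv track=rewrite | github.com/Beatriz238/PL2025-A100602 | TP2/datasetAnalise.py | obras_por_periodo
-- ===== SOURCE A (Python) =====
-- def obras_por_periodo(dados):
--     obras = {}
--     for linha in dados:
--         periodo = linha[3].strip()
--         titulo = linha[0].strip()
--         if periodo and titulo:
--             if periodo not in obras:
--                 obras[periodo] = []
--             obras[periodo].append(titulo)
--
--     for periodo in obras:
--         obras[periodo].sort()
--
--     return obras
-- ===== SOURCE B (Python) =====
-- def obras_por_periodo(dados):
--     limpos = [(linha[3].strip(), linha[0].strip()) for linha in dados]
--     pares = [par for par in limpos if par[0] and par[1]]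
--     periodos = list(dict.fromkeys(periodo for periodo, _ in pares))
--     return {periodo: sorted(titulo for p, titulo in pares if p == periodo)
--             for periodo in periodos}
-- ===== Notes on version B (the rewrite author's own statement) =====
-- stated objective: alternative
-- what changed: A builds a dict of lists incrementally while scanning and then sorts each list in place; B works in staged comprehensions: strip every row, filter out empty pairs, take the distinct periods in first-occurrence order, and build the result dict in one comprehension whose value is a per-period filter-and-sort, never mutating any dict entry.
-- outside the precondition, e.g. on obras_por_periodo([['x']]): A raises IndexError, B raises IndexError
import Mathlib
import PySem

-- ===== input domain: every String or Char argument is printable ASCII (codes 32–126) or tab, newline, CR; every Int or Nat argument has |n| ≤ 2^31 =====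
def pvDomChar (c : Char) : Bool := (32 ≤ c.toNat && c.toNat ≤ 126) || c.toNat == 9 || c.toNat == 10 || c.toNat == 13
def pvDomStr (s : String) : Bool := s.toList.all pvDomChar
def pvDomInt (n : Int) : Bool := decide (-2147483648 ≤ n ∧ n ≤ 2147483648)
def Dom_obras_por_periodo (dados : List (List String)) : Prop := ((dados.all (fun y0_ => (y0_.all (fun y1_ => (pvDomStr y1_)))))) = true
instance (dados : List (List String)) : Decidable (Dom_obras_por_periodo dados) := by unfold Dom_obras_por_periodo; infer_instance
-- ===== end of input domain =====

-- B replaces A's incremental dict-of-lists building + per-entry in-place sort by staged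
-- comprehensions: strip, filter, distinct periods, then one dict comprehension whose value is a
-- per-period filter-and-sort (objective: alternative).

-- ===== PORT A =====
-- one iteration of A's first loop: clean the row, group the title under its period
def aStep (obras : PySem.Dict String (List String)) (linha : List String) :
    PySem.Dict String (List String) :=
  match PySem.List.pyGet? linha 3, PySem.List.pyGet? linha 0 with
  | some l3, some l0 =>
      let periodo := PySem.Str.strip l3
      let titulo := PySem.Str.strip l0
      if periodo ≠ "" ∧ titulo ≠ "" then
        PySem.Dict.modify obras periodo [] (fun v => v ++ [titulo])
      else obras
  | _, _ => obras

-- one iteration of A's second loop: obras[periodo].sort()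
def aSortStep (d : PySem.Dict String (List String)) (k : String) :
    PySem.Dict String (List String) :=
  PySem.Dict.modify d k [] (fun v => PySem.List.sorted v (fun x => x) false)

def obras_por_periodo (dados : List (List String)) : List (String × List String) :=
  let obras := dados.foldl aStep PySem.Dict.empty
  let obras := obras.keys.foldl aSortStep obras
  obras.items

-- ===== PORT B =====
-- (linha[3].strip(), linha[0].strip()); the Options carry the possible IndexError
def limpaLinha (linha : List String) : Option (String × String) :=
  (PySem.List.pyGet? linha 3).bind fun c3 =>
  (PySem.List.pyGet? linha 0).map fun c0 =>
  (PySem.Str.strip c3, PySem.Str.strip c0)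

def obras_por_periodo_alt (dados : List (List String)) : List (String × List String) :=
  let limpos := dados.filterMap limpaLinha
  let pares := limpos.filter (fun par => !(par.1 == "") && !(par.2 == ""))
  let periodos := PySem.Set.ofList (pares.map (fun q => q.1))
  (periodos.foldl (fun d periodo =>
      d.insert periodo
        (PySem.List.sorted ((pares.filter (fun q => q.1 == periodo)).map (fun q => q.2))
          (fun x => x) false))
    PySem.Dict.empty).items

-- ===== PRECONDITION & SPEC =====
-- Pre_ excludes rows with fewer than 4 fields, on which the Python A raises IndexError (and B raises too).
def Pre_obras_por_periodo (dados : List (List String)) : Prop :=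
  ∀ linha ∈ dados, 4 ≤ linha.length
instance (dados : List (List String)) : Decidable (Pre_obras_por_periodo dados) := by
  unfold Pre_obras_por_periodo; infer_instance

def pvWitness_obras_por_periodo : List (List String) :=
  [["Os Maias", "x", "y", " Romantismo "], ["  ", "x", "y", "Romantismo"],
   ["Amor de Perdicao", "x", "y", "Romantismo"]]

def Spec_obras_por_periodo (dados : List (List String)) (out : List (String × List String)) : Prop := out = obras_por_periodo_alt dados
instance (dados : List (List String)) (out : List (String × List String)) : Decidable (Spec_obras_por_periodo dados out) := by unfold Spec_obras_por_periodo; infer_instance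

-- ===== CLAIM (what is proved, stated in full; the proofs are below) =====
def Claim_equal_obras_por_periodo : Prop := ∀ (dados : List (List String)), Dom_obras_por_periodo dados → Pre_obras_por_periodo dados → Spec_obras_por_periodo dados (obras_por_periodo dados)

-- ===== LEMMAS AND PROOFS =====

-- the cleaned pairs both programs end up grouping, as one filterMap
def pvPairs (dados : List (List String)) : List (String × String) :=
  dados.filterMap (fun linha =>
    match PySem.List.pyGet? linha 3, PySem.List.pyGet? linha 0 with
    | some l3, some l0 =>
        let periodo := PySem.Str.strip l3
        let titulo := PySem.Str.strip l0
        if periodo ≠ "" ∧ titulo ≠ "" then some (periodo, titulo) else none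
    | _, _ => none)

-- B's strip-then-filter stages produce exactly those pairs
lemma pares_eq (dados : List (List String)) :
    (dados.filterMap limpaLinha).filter (fun par => !(par.1 == "") && !(par.2 == ""))
      = pvPairs dados := by
  unfold pvPairs
  rw [List.filter_filterMap]
  apply List.filterMap_congr
  intro linha _
  cases h3 : PySem.List.pyGet? linha 3 <;> cases h0 : PySem.List.pyGet? linha 0 <;>
    simp only [limpaLinha, h3, h0, Option.bind, Option.map, Option.filter]
  rename_i a b
  by_cases ha : PySem.Str.strip a = "" <;> by_cases hb : PySem.Str.strip b = "" <;>
    simp [ha, hb]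

lemma aStep_foldl (dados : List (List String)) :
    ∀ d, dados.foldl aStep d =
      (pvPairs dados).foldl (fun d p => d.modify p.1 [] (fun x => x ++ [p.2])) d := by
  induction dados with
  | nil => intro d; simp [pvPairs]
  | cons linha rest ih =>
      intro d
      simp only [List.foldl_cons, pvPairs, List.filterMap_cons]
      cases h3 : PySem.List.pyGet? linha 3 <;> cases h0 : PySem.List.pyGet? linha 0 <;>
        simp only [aStep, h3, h0, ih, pvPairs]
      split <;> simp

lemma sortFold_getD (L : List String) :
    ∀ d : PySem.Dict String (List String), L.Nodup → ∀ k,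
      (L.foldl aSortStep d).getD k [] =
        if k ∈ L then PySem.List.sorted (d.getD k []) (fun x => x) false
        else d.getD k [] := by
  induction L with
  | nil => intro d _ k; simp
  | cons a rest ih =>
      intro d hnd k
      have hrest := (List.nodup_cons.mp hnd).2
      have hane := (List.nodup_cons.mp hnd).1
      simp only [List.foldl_cons]
      rw [ih _ hrest k]
      by_cases hk : k ∈ rest
      · have : k ≠ a := fun h => hane (h ▸ hk)
        simp [hk, this, aSortStep, PySem.Dict.getD_modify]
      · simp only [hk, if_false]
        by_cases hka : k = a
        · subst hka
          simp [aSortStep, hk]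
        · simp [aSortStep, PySem.Dict.getD_modify, hka, hk]

lemma update_self (L : List String) (s : PySem.Set String) (h : ∀ x ∈ L, x ∈ s) :
    PySem.Set.update s L = s := by
  rw [PySem.Set.update_eq_append_filter]
  have : (PySem.Set.ofList L).filter (fun y => !(PySem.Set.contains s y)) = [] := by
    apply List.filter_eq_nil_iff.mpr
    intro x hx
    rw [PySem.Set.mem_ofList] at hx
    simpa using h x hx
  rw [this, List.append_nil]

lemma sortFold_keys (d : PySem.Dict String (List String)) :
    (d.keys.foldl aSortStep d).keys = d.keys := by
  have := PySem.Dict.keys_foldl_modify_key d.keys (fun k => k) []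
    (fun _ _ => fun v => PySem.List.sorted v (fun x => x) false) d
  simp only [List.map_id'] at this
  calc (d.keys.foldl aSortStep d).keys
      = PySem.Set.update d.keys d.keys := this
    _ = d.keys := update_self _ _ (fun x hx => hx)

-- ===== VERDICT (by name: the statement is the Claim_ definition above) =====
theorem obras_por_periodo_spec : Claim_equal_obras_por_periodo := by
  intro dados _hDom _hPre
  unfold Spec_obras_por_periodo obras_por_periodo obras_por_periodo_alt
  simp only [pares_eq dados, aStep_foldl dados]
  set P := pvPairs dados with hP
  -- A's grouped dict
  set d1 : PySem.Dict String (List String) :=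
    P.foldl (fun d p => d.modify p.1 [] (fun x => x ++ [p.2])) PySem.Dict.empty with hd1
  have hkeys1 : d1.keys = PySem.Set.ofList (P.map (fun q => q.1)) := by
    rw [hd1, PySem.Dict.keys_foldl_modify_key P (fun q => q.1) []
      (fun _ p => fun x => x ++ [p.2]) PySem.Dict.empty]
    rfl
  have hnd1 : d1.keys.Nodup := by
    rw [hkeys1]; exact PySem.Set.nodup_ofList _
  have hnd2 : (d1.keys.foldl aSortStep d1).keys.Nodup := by
    rw [sortFold_keys]; exact hnd1
  rw [PySem.Dict.items_eq_map_keys _ hnd2 [], sortFold_keys]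
  have hfresh := PySem.Dict.items_foldl_insert_fresh
    (PySem.Set.ofList (P.map (fun q => q.1))) (fun k => k)
    (fun periodo => PySem.List.sorted ((P.filter (fun q => q.1 == periodo)).map (fun q => q.2))
      (fun x => x) false) PySem.Dict.empty
    (fun a _ => rfl) (by simp [PySem.Set.nodup_ofList])
  rw [hfresh, show (PySem.Dict.empty : PySem.Dict String (List String)).items =
    ([] : List (String × List String)) from rfl, List.nil_append, ← hkeys1]
  apply List.map_congr_left
  intro k hk
  rw [sortFold_getD d1.keys d1 hnd1 k, if_pos hk, hd1,
    PySem.Dict.getD_foldl_modify_append]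
  rfl
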